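-- pv_equiv track=rewrite | github.com/Akodiat/polycubes | py/analyse_output.py | largestOfThree
-- ===== SOURCE A (Python) =====
-- def largestOfThree(x, y, z):
--     r = []
--     s = [x, y, z]
--     s.sort(reverse=True)
--     for i in x, y, z:
--         if i == s[0]:
--             r.append(2)
--             continue
--         if i == s[1]:
--             r.append(1)
--             continue
--         if i == s[2]:
--             r.append(0)
--             continue
--     return r
-- ===== SOURCE B (Python) =====
-- def largestOfThree(x, y, z):
--     return [2 - sum(1 for w in (x, y, z) if w > v) for v in (x, y, z)]
-- ===== Notes on version B (the rewrite author's own statement) =====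
-- stated objective: simpler
-- what changed: Replaces the sort-then-lookup loop with a one-line rank formula: each value's rank is 2 minus the number of strictly greater values among the three.
import Mathlib
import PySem

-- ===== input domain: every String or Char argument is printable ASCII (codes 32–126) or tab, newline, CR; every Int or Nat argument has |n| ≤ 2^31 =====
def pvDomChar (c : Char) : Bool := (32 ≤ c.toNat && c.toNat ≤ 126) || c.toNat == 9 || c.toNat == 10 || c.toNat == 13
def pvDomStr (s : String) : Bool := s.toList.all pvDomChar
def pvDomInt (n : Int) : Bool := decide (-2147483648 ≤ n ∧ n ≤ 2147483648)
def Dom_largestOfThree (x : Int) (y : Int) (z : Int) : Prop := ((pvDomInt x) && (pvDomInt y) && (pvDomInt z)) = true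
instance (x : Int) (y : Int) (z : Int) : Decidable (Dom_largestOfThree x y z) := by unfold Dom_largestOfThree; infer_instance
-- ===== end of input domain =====

-- B replaces A's sort-then-lookup loop with a direct rank formula (2 minus the count of strictly greater values): simpler, same result.


-- ===== PORT A =====
def largestOfThree (x : Int) (y : Int) (z : Int) : List Int :=
  let s := PySem.List.sorted [x, y, z] (fun v => v) true
  [x, y, z].foldl (fun r i =>
    if i = PySem.List.pyGetD s 0 0 then r ++ [2]
    else if i = PySem.List.pyGetD s 1 0 then r ++ [1]
    else if i = PySem.List.pyGetD s 2 0 then r ++ [0]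
    else r) []

-- ===== PORT B =====
def largestOfThree_alt (x : Int) (y : Int) (z : Int) : List Int :=
  [x, y, z].map (fun v => 2 - (([x, y, z].filter (fun w => v < w)).length : Int))

-- ===== PRECONDITION & SPEC =====
def Spec_largestOfThree (x : Int) (y : Int) (z : Int) (out : List Int) : Prop := out = largestOfThree_alt x y z
instance (x : Int) (y : Int) (z : Int) (out : List Int) : Decidable (Spec_largestOfThree x y z out) := by unfold Spec_largestOfThree; infer_instance

-- ===== CLAIM (what is proved, stated in full; the proofs are below) =====
def Claim_equal_largestOfThree : Prop := ∀ (x : Int) (y : Int) (z : Int), Dom_largestOfThree x y z → Spec_largestOfThree x y z (largestOfThree x y z)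

-- ===== LEMMAS AND PROOFS =====
set_option maxHeartbeats 1000000 in
theorem largestOfThree_eq_alt (x y z : Int) : largestOfThree x y z = largestOfThree_alt x y z := by
  simp only [largestOfThree, largestOfThree_alt, PySem.List.sorted_rev_eq_foldl_insertBy]
  rcases lt_or_ge x y with h1 | h1 <;> rcases lt_or_ge x z with h2 | h2 <;> rcases lt_or_ge y z with h3 | h3 <;>
    · simp [List.foldl, PySem.List.insertBy, List.filter_cons,
        PySem.List.pyGetD, PySem.List.pyGet?, PySem.List.pyIdx?, h1, h2, h3, not_lt_of_ge]
      split_ifs <;> simp_all <;> omega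

-- ===== VERDICT (by name: the statement is the Claim_ definition above) =====
theorem largestOfThree_spec : Claim_equal_largestOfThree := by
  intro x y z _
  exact largestOfThree_eq_alt x y z
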